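-- pv_equiv track=rewrite | github.com/blacksoxx/vmware-migration-agent | providers/openstack/sizing_table.py | _select_vcpu_bucket
-- ===== SOURCE A (Python) =====
-- _OPENSTACK_SIZING_TABLE: dict[int, list[tuple[int, str]]] = {
--     1: [
--         (1024, "m1.tiny"),
--         (2048, "m1.small"),
--     ],
--     2: [
--         (4096, "m1.small"),
--         (8192, "m1.medium"),
--         (16384, "m1.large"),
--     ],
--     4: [
--         (8192, "m1.medium"),
--         (16384, "m1.large"),
--         (32768, "m1.xlarge"),
--     ],
--     8: [
--         (16384, "m1.large"),
--         (32768, "m1.xlarge"),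
--         (65536, "m1.2xlarge"),
--     ],
--     16: [
--         (32768, "m1.xlarge"),
--         (65536, "m1.2xlarge"),
--         (131072, "m1.4xlarge"),
--     ],
-- }
--
-- def _select_vcpu_bucket(requested_vcpus: int) -> int:
--     if requested_vcpus in _OPENSTACK_SIZING_TABLE:
--         return requested_vcpus
--
--     available = sorted(_OPENSTACK_SIZING_TABLE)
--     for candidate in available:
--         if candidate >= requested_vcpus:
--             return candidate
--
--     return available[-1]
-- ===== SOURCE B (Python) =====
-- def _select_vcpu_bucket(requested_vcpus: int) -> int:
--     keys = [1, 2, 4, 8, 16]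
--     lo, hi = 0, len(keys)
--     while lo < hi:
--         mid = (lo + hi) // 2
--         if keys[mid] < requested_vcpus:
--             lo = mid + 1
--         else:
--             hi = mid
--     return keys[lo] if lo < len(keys) else keys[-1]
-- ===== Notes on version B (the rewrite author's own statement) =====
-- stated objective: idiomatic
-- what changed: Replaced the dict-membership guard plus linear scan over the sorted keys by a single binary search (bisect_left-style) over the fixed sorted key list, dropping the redundant exact-match branch.
import Mathlib
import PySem

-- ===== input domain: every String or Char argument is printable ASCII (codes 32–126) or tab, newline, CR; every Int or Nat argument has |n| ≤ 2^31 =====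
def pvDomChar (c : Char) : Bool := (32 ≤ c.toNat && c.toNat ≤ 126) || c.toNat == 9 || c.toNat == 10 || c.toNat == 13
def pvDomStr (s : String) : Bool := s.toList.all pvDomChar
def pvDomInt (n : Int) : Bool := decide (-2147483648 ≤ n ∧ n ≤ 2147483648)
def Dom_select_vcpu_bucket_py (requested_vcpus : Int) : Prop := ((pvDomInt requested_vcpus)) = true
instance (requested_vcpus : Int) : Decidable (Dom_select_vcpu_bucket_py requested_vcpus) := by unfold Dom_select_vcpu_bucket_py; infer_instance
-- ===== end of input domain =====

-- B replaces A's dict-membership guard + linear scan by one binary search over the sorted key list (idiomatic; same result).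

-- ===== PORT A =====
-- the module-level sizing table, as a dict literal (association list in insertion order)
def pvTable : PySem.Dict Int (List (Int × String)) :=
  PySem.Dict.ofList
    [ (1, [(1024, "m1.tiny"), (2048, "m1.small")])
    , (2, [(4096, "m1.small"), (8192, "m1.medium"), (16384, "m1.large")])
    , (4, [(8192, "m1.medium"), (16384, "m1.large"), (32768, "m1.xlarge")])
    , (8, [(16384, "m1.large"), (32768, "m1.xlarge"), (65536, "m1.2xlarge")])
    , (16, [(32768, "m1.xlarge"), (65536, "m1.2xlarge"), (131072, "m1.4xlarge")]) ]

-- 'for candidate in available: if candidate >= requested: return candidate'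
def pvFindGE : List Int → Int → Option Int
  | [], _ => none
  | c :: rest, r => if c ≥ r then some c else pvFindGE rest r

def select_vcpu_bucket_py (requested_vcpus : Int) : Int :=
  if pvTable.contains requested_vcpus then requested_vcpus
  else
    let available := PySem.List.sorted pvTable.keys (fun x => x) false
    match pvFindGE available requested_vcpus with
    | some c => c
    | none => (PySem.List.pyGet? available (-1)).getD 0   -- available[-1]; list is nonempty, never the default

-- ===== PORT B =====
-- the while-loop binary search (bisect_left), recursion on hi - lo
def pvBisect (keys : List Int) (x : Int) (lo hi : Nat) : Nat :=
  if _h : lo < hi then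
    let mid := (lo + hi) / 2
    if keys.getD mid 0 < x then pvBisect keys x (mid + 1) hi else pvBisect keys x lo mid
  else lo
termination_by hi - lo
decreasing_by all_goals omega

def select_vcpu_bucket_py_alt (requested_vcpus : Int) : Int :=
  let keys : List Int := [1, 2, 4, 8, 16]
  let lo := pvBisect keys requested_vcpus 0 keys.length
  if lo < keys.length then keys.getD lo 0 else keys.getD (keys.length - 1) 0  -- keys[lo] / keys[-1], both in range

-- ===== PRECONDITION & SPEC =====
def Spec_select_vcpu_bucket_py (requested_vcpus : Int) (out : Int) : Prop := out = select_vcpu_bucket_py_alt requested_vcpus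
instance (requested_vcpus : Int) (out : Int) : Decidable (Spec_select_vcpu_bucket_py requested_vcpus out) := by unfold Spec_select_vcpu_bucket_py; infer_instance

-- ===== CLAIM (what is proved, stated in full; the proofs are below) =====
def Claim_equal_select_vcpu_bucket_py : Prop := ∀ (requested_vcpus : Int), Dom_select_vcpu_bucket_py requested_vcpus → Spec_select_vcpu_bucket_py requested_vcpus (select_vcpu_bucket_py requested_vcpus)

-- ===== LEMMAS AND PROOFS =====
-- closed-form value both programs compute
def pvBucket (n : Int) : Int :=
  if n ≤ 1 then 1 else if n ≤ 2 then 2 else if n ≤ 4 then 4 else if n ≤ 8 then 8 else 16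

lemma pvTable_items : pvTable.items =
    [ (1, [(1024, "m1.tiny"), (2048, "m1.small")])
    , (2, [(4096, "m1.small"), (8192, "m1.medium"), (16384, "m1.large")])
    , (4, [(8192, "m1.medium"), (16384, "m1.large"), (32768, "m1.xlarge")])
    , (8, [(16384, "m1.large"), (32768, "m1.xlarge"), (65536, "m1.2xlarge")])
    , (16, [(32768, "m1.xlarge"), (65536, "m1.2xlarge"), (131072, "m1.4xlarge")]) ] := by decide

lemma pvA_eq (n : Int) : select_vcpu_bucket_py n = pvBucket n := by
  by_cases h1 : n = 1; · subst h1; decide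
  by_cases h2 : n = 2; · subst h2; decide
  by_cases h4 : n = 4; · subst h4; decide
  by_cases h8 : n = 8; · subst h8; decide
  by_cases h16 : n = 16; · subst h16; decide
  have hc : pvTable.contains n = false := by
    simp only [PySem.Dict.contains, pvTable_items]
    simp
    omega
  have hs : PySem.List.sorted pvTable.keys (fun x => x) false = [1, 2, 4, 8, 16] := by decide
  have hlast : (PySem.List.pyGet? ([1, 2, 4, 8, 16] : List Int) (-1)).getD 0 = 16 := by decide
  simp only [select_vcpu_bucket_py, hc, hs, Bool.false_eq_true, if_false]
  simp only [pvFindGE, pvBucket, hlast]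
  split_ifs <;> simp_all

lemma pvBisect_base (x : Int) (lo : Nat) : pvBisect [1, 2, 4, 8, 16] x lo lo = lo := by
  rw [pvBisect]; simp

lemma pvBisect_step (x : Int) (lo hi : Nat) (h : lo < hi) :
    pvBisect [1, 2, 4, 8, 16] x lo hi =
      if ([1, 2, 4, 8, 16] : List Int).getD ((lo + hi) / 2) 0 < x
      then pvBisect [1, 2, 4, 8, 16] x ((lo + hi) / 2 + 1) hi
      else pvBisect [1, 2, 4, 8, 16] x lo ((lo + hi) / 2) := by
  rw [pvBisect]; simp [h]

lemma pvBisect_val (n : Int) : pvBisect [1, 2, 4, 8, 16] n 0 5 =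
    (if n ≤ 1 then 0 else if n ≤ 2 then 1 else if n ≤ 4 then 2 else if n ≤ 8 then 3
     else if n ≤ 16 then 4 else 5) := by
  rw [pvBisect_step _ 0 5 (by norm_num)]
  rw [show (([1, 2, 4, 8, 16] : List Int).getD ((0 + 5) / 2) 0) = 4 from rfl]
  by_cases h4 : 4 < n
  · rw [if_pos h4, pvBisect_step _ 3 5 (by norm_num)]
    rw [show (([1, 2, 4, 8, 16] : List Int).getD ((3 + 5) / 2) 0) = 16 from rfl]
    by_cases h16 : 16 < n
    · rw [if_pos h16, pvBisect_base]
      split_ifs <;> omega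
    · rw [if_neg h16, pvBisect_step _ 3 4 (by norm_num)]
      rw [show (([1, 2, 4, 8, 16] : List Int).getD ((3 + 4) / 2) 0) = 8 from rfl]
      by_cases h8 : 8 < n
      · rw [if_pos h8, pvBisect_base]; split_ifs <;> omega
      · rw [if_neg h8, pvBisect_base]; split_ifs <;> omega
  · rw [if_neg h4, pvBisect_step _ 0 2 (by norm_num)]
    rw [show (([1, 2, 4, 8, 16] : List Int).getD ((0 + 2) / 2) 0) = 2 from rfl]
    by_cases h2 : 2 < n
    · rw [if_pos h2, pvBisect_base]; split_ifs <;> omega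
    · rw [if_neg h2, pvBisect_step _ 0 1 (by norm_num)]
      rw [show (([1, 2, 4, 8, 16] : List Int).getD ((0 + 1) / 2) 0) = 1 from rfl]
      by_cases h1 : 1 < n
      · rw [if_pos h1, pvBisect_base]; split_ifs <;> omega
      · rw [if_neg h1, pvBisect_base]; split_ifs <;> omega

lemma pvB_eq (n : Int) : select_vcpu_bucket_py_alt n = pvBucket n := by
  have hform : select_vcpu_bucket_py_alt n =
      (if pvBisect [1, 2, 4, 8, 16] n 0 5 < 5
       then ([1, 2, 4, 8, 16] : List Int).getD (pvBisect [1, 2, 4, 8, 16] n 0 5) 0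
       else 16) := rfl
  rw [hform, pvBisect_val, pvBucket]
  split_ifs <;> simp_all

-- ===== VERDICT (by name: the statement is the Claim_ definition above) =====
theorem select_vcpu_bucket_py_spec : Claim_equal_select_vcpu_bucket_py := by
  intro n _
  unfold Spec_select_vcpu_bucket_py
  rw [pvA_eq, pvB_eq]
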